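-- pv_equiv track=rewrite | github.com/ogmacorp/PyAOgmaNeo | examples/Maze.py | getVisual
-- ===== SOURCE A (Python) =====
-- maze = [
--     [ 1, 1, 1, 1, 1, 1, 1, 1 ],
--     [ 1, 0, 1, 0, 0, 0, 0, 1 ],
--     [ 1, 0, 0, 0, 1, 1, 0, 1 ],
--     [ 1, 0, 0, 0, 0, 0, 0, 1 ],
--     [ 1, 0, 1, 0, 0, 0, 0, 1 ],
--     [ 1, 0, 1, 1, 0, 1, 0, 1 ],
--     [ 1, 0, 0, 0, 0, 1, 0, 1 ],
--     [ 1, 1, 1, 1, 1, 1, 1, 1 ]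
-- ]
--
-- mazeSize = ( len(maze), len(maze[0]) )
--
-- visRadius = 3 # Radius of visual field
--
-- visDiam = visRadius * 2 + 1
--
-- visArea = visDiam * visDiam
--
-- def getVisual(pos):
--     # Determine vision - rectangle around agent
--     v = visArea * [ 0 ]
--
--     for dx in range(-visRadius, visRadius + 1):
--         for dy in range(-visRadius, visRadius + 1):
--             vPos = [ pos[0] + dx, pos[1] + dy ]
--
--             if vPos[0] >= 0 and vPos[1] >= 0 and vPos[0] < mazeSize[0] and vPos[1] < mazeSize[1]:
--                 v[dx + visRadius + (dy + visRadius) * visDiam] = maze[vPos[1]][vPos[0]]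
--
--     return v
-- ===== SOURCE B (Python) =====
-- maze = [
--     [ 1, 1, 1, 1, 1, 1, 1, 1 ],
--     [ 1, 0, 1, 0, 0, 0, 0, 1 ],
--     [ 1, 0, 0, 0, 1, 1, 0, 1 ],
--     [ 1, 0, 0, 0, 0, 0, 0, 1 ],
--     [ 1, 0, 1, 0, 0, 0, 0, 1 ],
--     [ 1, 0, 1, 1, 0, 1, 0, 1 ],
--     [ 1, 0, 0, 0, 0, 1, 0, 1 ],
--     [ 1, 1, 1, 1, 1, 1, 1, 1 ]
-- ]
--
-- mazeSize = ( len(maze), len(maze[0]) )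
-- visRadius = 3
-- visDiam = visRadius * 2 + 1
-- visArea = visDiam * visDiam
--
-- def getVisual(pos):
--     # Build the field row by row: each output row is zeros, a contiguous
--     # slice of the maze row, then zeros again (no per-cell bound tests).
--     x, y = pos[0], pos[1]
--     lo = max(0, visRadius - x)                       # first in-bounds column offset
--     hi = min(visDiam, mazeSize[0] + visRadius - x)   # one past the last in-bounds column offset
--     v = []
--     for dy in range(-visRadius, visRadius + 1):
--         ry = y + dy
--         if 0 <= ry < mazeSize[1] and lo < hi:
--             v += [0] * lo + maze[ry][x + lo - visRadius : x + hi - visRadius] + [0] * (visDiam - hi)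
--         else:
--             v += [0] * visDiam
--     return v
-- ===== Notes on version B (the rewrite author's own statement) =====
-- stated objective: simpler
-- what changed: A tests bounds per cell in a 7x7 nested loop and writes into a preallocated 49-slot array; B precomputes the clamped column range once and builds the field row by row as zeros ++ a contiguous maze-row slice ++ zeros.
import Mathlib
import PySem

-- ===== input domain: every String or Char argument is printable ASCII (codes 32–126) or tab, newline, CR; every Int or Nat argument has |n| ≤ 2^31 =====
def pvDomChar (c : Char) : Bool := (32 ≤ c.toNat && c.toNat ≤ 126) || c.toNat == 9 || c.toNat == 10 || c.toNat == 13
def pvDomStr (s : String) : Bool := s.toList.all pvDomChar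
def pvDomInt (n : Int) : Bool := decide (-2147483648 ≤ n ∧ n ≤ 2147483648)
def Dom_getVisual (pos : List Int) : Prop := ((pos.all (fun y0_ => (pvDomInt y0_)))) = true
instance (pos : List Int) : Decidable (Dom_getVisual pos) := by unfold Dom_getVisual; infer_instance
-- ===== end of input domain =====

-- B replaces A's 49 per-cell bound tests with a row-by-row build: each output row is
-- zeros ++ a contiguous slice of the maze row ++ zeros, using precomputed clamped column
-- bounds (objective: simpler/alternative decomposition, same asymptotic cost).
-- Both ports read the first two entries of pos via the total pyGetD; Pre_ (2 ≤ pos.length)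
-- keeps us exactly where Python's two index reads return (A raises IndexError otherwise).

-- ===== PORT A =====
-- module constants (same values the Python module computes)
def mazeL : List (List Int) :=
  [[1,1,1,1,1,1,1,1],
   [1,0,1,0,0,0,0,1],
   [1,0,0,0,1,1,0,1],
   [1,0,0,0,0,0,0,1],
   [1,0,1,0,0,0,0,1],
   [1,0,1,1,0,1,0,1],
   [1,0,0,0,0,1,0,1],
   [1,1,1,1,1,1,1,1]]
def mazeSizeL : Int × Int := ((mazeL.length : Int), (((PySem.List.pyGetD mazeL 0 []).length : Int)))
def visRadiusL : Int := 3
def visDiamL : Int := visRadiusL * 2 + 1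
def visAreaL : Int := visDiamL * visDiamL

-- literal transliteration of A: v = visArea*[0]; nested dx/dy loops, per-cell bound test,
-- v[dx+visRadius+(dy+visRadius)*visDiam] = maze[vPos[1]][vPos[0]] (index always in range,
-- so the total pySetD/pyGetD forms are exact here)
def getVisual (pos : List Int) : List Int :=
  let v0 : List Int := List.replicate visAreaL.toNat 0
  (PySem.List.pyRange (-visRadiusL) (visRadiusL + 1)).foldl (fun v dx =>
    (PySem.List.pyRange (-visRadiusL) (visRadiusL + 1)).foldl (fun v dy =>
      let vPos : Int × Int := (PySem.List.pyGetD pos 0 0 + dx, PySem.List.pyGetD pos 1 0 + dy)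
      if vPos.1 ≥ 0 ∧ vPos.2 ≥ 0 ∧ vPos.1 < mazeSizeL.1 ∧ vPos.2 < mazeSizeL.2 then
        PySem.List.pySetD v (dx + visRadiusL + (dy + visRadiusL) * visDiamL)
          (PySem.List.pyGetD (PySem.List.pyGetD mazeL vPos.2 []) vPos.1 0)
      else v) v) v0

-- ===== PORT B =====
-- transliteration of Source B: clamped column bounds lo/hi computed once; each row is
-- [0]*lo ++ maze[ry][x+lo-3 : x+hi-3] ++ [0]*(7-hi), or a zero row when out of range
def getVisual_alt (pos : List Int) : List Int :=
  let x := PySem.List.pyGetD pos 0 0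
  let y := PySem.List.pyGetD pos 1 0
  let lo := max 0 (visRadiusL - x)
  let hi := min visDiamL (mazeSizeL.1 + visRadiusL - x)
  (PySem.List.pyRange (-visRadiusL) (visRadiusL + 1)).foldl (fun v dy =>
    let ry := y + dy
    if 0 ≤ ry ∧ ry < mazeSizeL.2 ∧ lo < hi then
      v ++ (List.replicate lo.toNat (0 : Int)
            ++ PySem.List.slice (PySem.List.pyGetD mazeL ry [])
                 (some (x + lo - visRadiusL)) (some (x + hi - visRadiusL))
            ++ List.replicate (visDiamL - hi).toNat (0 : Int))
    else v ++ List.replicate visDiamL.toNat (0 : Int)) []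

-- ===== PRECONDITION & SPEC =====
-- Pre_ excludes only lists of length < 2, on which Python's indexing of pos raises IndexError.
def Pre_getVisual (pos : List Int) : Prop := 2 ≤ pos.length
instance (pos : List Int) : Decidable (Pre_getVisual pos) := by unfold Pre_getVisual; infer_instance
def pvWitness_getVisual : List Int := [1, 2]

def Spec_getVisual (pos : List Int) (out : List Int) : Prop := out = getVisual_alt pos
instance (pos : List Int) (out : List Int) : Decidable (Spec_getVisual pos out) := by unfold Spec_getVisual; infer_instance

-- ===== CLAIM (what is proved, stated in full; the proofs are below) =====
def Claim_equal_getVisual : Prop := ∀ (pos : List Int), Dom_getVisual pos → Pre_getVisual pos → Spec_getVisual pos (getVisual pos)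

-- ===== LEMMAS AND PROOFS =====

-- A's body as a function of the two coordinates (proof helper; getVisual pos ≡ pvA x y by rfl)
def pvA (x y : Int) : List Int :=
  let v0 : List Int := List.replicate visAreaL.toNat 0
  (PySem.List.pyRange (-visRadiusL) (visRadiusL + 1)).foldl (fun v dx =>
    (PySem.List.pyRange (-visRadiusL) (visRadiusL + 1)).foldl (fun v dy =>
      let vPos : Int × Int := (x + dx, y + dy)
      if vPos.1 ≥ 0 ∧ vPos.2 ≥ 0 ∧ vPos.1 < mazeSizeL.1 ∧ vPos.2 < mazeSizeL.2 then
        PySem.List.pySetD v (dx + visRadiusL + (dy + visRadiusL) * visDiamL)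
          (PySem.List.pyGetD (PySem.List.pyGetD mazeL vPos.2 []) vPos.1 0)
      else v) v) v0

-- B's body as a function of the two coordinates
def pvB (x y : Int) : List Int :=
  let lo := max 0 (visRadiusL - x)
  let hi := min visDiamL (mazeSizeL.1 + visRadiusL - x)
  (PySem.List.pyRange (-visRadiusL) (visRadiusL + 1)).foldl (fun v dy =>
    let ry := y + dy
    if 0 ≤ ry ∧ ry < mazeSizeL.2 ∧ lo < hi then
      v ++ (List.replicate lo.toNat (0 : Int)
            ++ PySem.List.slice (PySem.List.pyGetD mazeL ry [])
                 (some (x + lo - visRadiusL)) (some (x + hi - visRadiusL))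
            ++ List.replicate (visDiamL - hi).toNat (0 : Int))
    else v ++ List.replicate visDiamL.toNat (0 : Int)) []

-- clamp a coordinate into [-4, 11]: the field only depends on the coordinate through this
def pvClamp (t : Int) : Int := max (-4) (min 11 t)

lemma pvA_eq (pos : List Int) :
    getVisual pos = pvA (PySem.List.pyGetD pos 0 0) (PySem.List.pyGetD pos 1 0) := rfl

lemma pvB_eq (pos : List Int) :
    getVisual_alt pos = pvB (PySem.List.pyGetD pos 0 0) (PySem.List.pyGetD pos 1 0) := rfl

lemma pvA_clamp (x y : Int) : pvA x y = pvA (pvClamp x) (pvClamp y) := by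
  unfold pvA
  apply PySem.List.foldl_congr_mem
  intro acc dx hdx
  have hdx' := PySem.List.mem_pyRange_one.mp hdx
  apply PySem.List.foldl_congr_mem
  intro v dy hdy
  have hdy' := PySem.List.mem_pyRange_one.mp hdy
  simp only [visRadiusL, visDiamL, mazeSizeL, mazeL] at hdx' hdy' ⊢
  by_cases h : x + dx ≥ 0 ∧ y + dy ≥ 0 ∧ x + dx < 8 ∧ y + dy < 8
  · have hx : pvClamp x = x := by unfold pvClamp; omega
    have hy : pvClamp y = y := by unfold pvClamp; omega
    rw [hx, hy]
  · have h' : ¬(pvClamp x + dx ≥ 0 ∧ pvClamp y + dy ≥ 0 ∧ pvClamp x + dx < 8 ∧ pvClamp y + dy < 8) := by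
      unfold pvClamp; omega
    simp only [List.length_cons, List.length_nil]
    rw [if_neg (by exact_mod_cast h), if_neg (by exact_mod_cast h')]

lemma pvB_clamp (x y : Int) : pvB x y = pvB (pvClamp x) (pvClamp y) := by
  unfold pvB
  apply PySem.List.foldl_congr_mem
  intro v dy hdy
  have hdy' := PySem.List.mem_pyRange_one.mp hdy
  simp only [visRadiusL, visDiamL, mazeSizeL, mazeL] at hdy' ⊢
  by_cases h : 0 ≤ y + dy ∧ y + dy < 8 ∧ max 0 (3 - x) < min 7 (8 + 3 - x)
  · have hx : pvClamp x = x := by unfold pvClamp; omega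
    have hy : pvClamp y = y := by unfold pvClamp; omega
    rw [hx, hy]
  · have h' : ¬(0 ≤ pvClamp y + dy ∧ pvClamp y + dy < 8 ∧
        max 0 (3 - pvClamp x) < min 7 (8 + 3 - pvClamp x)) := by
      unfold pvClamp; omega
    simp only [List.length_cons, List.length_nil]
    rw [if_neg (by exact_mod_cast h), if_neg (by exact_mod_cast h')]

set_option maxRecDepth 8192 in
set_option maxHeartbeats 4000000 in
lemma pv_key : ∀ i < 16, ∀ j < 16, pvA (-4 + (i : Nat)) (-4 + (j : Nat)) = pvB (-4 + i) (-4 + j) := by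
  decide

theorem getVisual_spec : Claim_equal_getVisual := by
  intro pos _ _
  unfold Spec_getVisual
  rw [pvA_eq, pvB_eq]
  set x := PySem.List.pyGetD pos 0 0 with hx
  set y := PySem.List.pyGetD pos 1 0 with hy
  have hi : (pvClamp x + 4).toNat < 16 := by unfold pvClamp; omega
  have hj : (pvClamp y + 4).toNat < 16 := by unfold pvClamp; omega
  have hix : -4 + ((pvClamp x + 4).toNat : Int) = pvClamp x := by unfold pvClamp; omega
  have hjy : -4 + ((pvClamp y + 4).toNat : Int) = pvClamp y := by unfold pvClamp; omega
  calc pvA x y = pvA (pvClamp x) (pvClamp y) := pvA_clamp x y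
    _ = pvB (pvClamp x) (pvClamp y) := by
          rw [← hix, ← hjy]; exact pv_key _ hi _ hj
    _ = pvB x y := (pvB_clamp x y).symm
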